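-- pv_equiv track=rewrite | github.com/cosmoparadox/mathematical-tools | livelock_final.py | build_H_E
-- ===== SOURCE A (Python) =====
-- def build_H_E(kernel_from, kernel_to=None):
--     """
--     H[i][j] = 1  iff  t_j.own == t_i.written   (pseudolivelock step)
--
--     E[k][j] = 1  iff  there exists H-edge (t_i -> t_j) such that t_k.own == t_i.pred
--                        AND t_k.written == t_j.pred.  Multiple t_k may qualify
--                        (they share the same (own,written) but differ in pred).
--
--     Construction: for each H-edge (t_i -> t_j):
--       arc changes pred: t_i.pred -> t_j.pred
--       find ALL t_k in kernel_from: t_k.own=t_i.pred, t_k.written=t_j.pred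
--       set E[k][j] = 1 for each such t_k  (arc-based forward map)
--
--     Result: E = H for protocols where pred==own (coloring-type).
--             E = I for protocols where written==pred (agreement-type).
--     """
--     Kf = sorted(kernel_from)
--     Kt = sorted(kernel_to) if kernel_to else Kf
--     nf, nt = len(Kf), len(Kt)
--
--     # (own,written) -> list of indices in Kf (may be multiple, differ only in pred)
--     from collections import defaultdict
--     ow_f = defaultdict(list)
--     for k, tk in enumerate(Kf):
--         ow_f[(tk[1], tk[2])].append(k)
--
--     # H on Kt (square)
--     H = [[0]*nt for _ in range(nt)]
--     for i,ti in enumerate(Kt):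
--         for j,tj in enumerate(Kt):
--             if tj[1] == ti[2]: H[i][j] = 1
--
--     # E: forward map Kf -> Kt
--     # For each H-edge (t_i -> t_j), ALL transitions t_k in Kf with
--     # t_k.own == t_i.pred AND t_k.written == t_j.pred are valid arc predecessors.
--     E = [[0]*nt for _ in range(nf)]
--     for i,ti in enumerate(Kt):
--         for j,tj in enumerate(Kt):
--             if not H[i][j]: continue
--             for k in ow_f.get((ti[0], tj[0]), []):
--                 E[k][j] = 1
--
--     return Kf, Kt, H, E
-- ===== SOURCE B (Python) =====
-- def build_H_E(kernel_from, kernel_to=None):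
--     Kf = sorted(kernel_from)
--     Kt = sorted(kernel_to) if kernel_to else Kf
--     # pairs (pred, written) realized by some transition in Kt
--     pw = {(ti[0], ti[2]) for ti in Kt}
--     H = [[1 if tj[1] == ti[2] else 0 for tj in Kt] for ti in Kt]
--     E = [[1 if (tk[1], tj[1]) in pw and tk[2] == tj[0] else 0 for tj in Kt]
--          for tk in Kf]
--     return Kf, Kt, H, E
-- ===== Notes on version B (the rewrite author's own statement) =====
-- stated objective: simpler
-- what changed: Replaces A's mutation-based construction (zero matrices updated in place, plus a defaultdict index (own,written)->row-indices that drives scattered E[k][j]=1 writes along H-edges of the previously built H) with two pure pointwise comprehensions: H[i][j] comes directly from its defining predicate, and E[k][j] from an O(1) test against a precomputed set of (pred,written) pairs of Kt, with no index dict, no reuse of H, and no mutation.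
import Mathlib
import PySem

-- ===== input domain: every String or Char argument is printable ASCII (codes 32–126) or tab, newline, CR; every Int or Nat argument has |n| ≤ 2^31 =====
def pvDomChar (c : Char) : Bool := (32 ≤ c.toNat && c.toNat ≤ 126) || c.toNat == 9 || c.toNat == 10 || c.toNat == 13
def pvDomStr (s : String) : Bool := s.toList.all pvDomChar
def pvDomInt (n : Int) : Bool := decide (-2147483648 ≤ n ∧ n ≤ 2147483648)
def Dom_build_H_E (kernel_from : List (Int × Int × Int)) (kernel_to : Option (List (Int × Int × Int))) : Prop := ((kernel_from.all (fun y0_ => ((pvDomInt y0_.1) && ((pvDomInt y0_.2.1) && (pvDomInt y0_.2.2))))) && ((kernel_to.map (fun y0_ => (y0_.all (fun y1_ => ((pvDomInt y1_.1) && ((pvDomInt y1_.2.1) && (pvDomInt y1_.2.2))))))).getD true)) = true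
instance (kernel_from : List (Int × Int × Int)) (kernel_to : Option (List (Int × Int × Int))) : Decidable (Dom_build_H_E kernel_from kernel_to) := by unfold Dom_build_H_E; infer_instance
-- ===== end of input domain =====

-- B rebuilds H and E as pure pointwise comprehensions (E via a precomputed (pred,written)-pair
-- set) instead of A's in-place matrix updates driven by a defaultdict index and the H-edges;
-- objective: simpler. Same cost; equal output proved for all inputs.

-- ===== PORT A =====
-- Shared helper: Python compares int-triples lexicographically; on the Dom bound |n| ≤ 2^31
-- the base-2^34 encoding below is an order-preserving injection, so sorting by this single
-- Int key is exactly Python's sorted() on these triples.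
def pvLexKey (t : Int × Int × Int) : Int := (t.1 * 17179869184 + t.2.1) * 17179869184 + t.2.2

-- M[i][j] read / 'M[i][j] = 1' write; every index reaching these in either port comes from
-- enumerate / the index dict, hence is a nonnegative in-range index, where .toNat is exact.
def pvGet2 (M : List (List Int)) (i j : Int) : Int := (M.getD i.toNat []).getD j.toNat 0
def pvSet2 (M : List (List Int)) (i j : Int) : List (List Int) :=
  M.set i.toNat ((M.getD i.toNat []).set j.toNat 1)

def build_H_E (kernel_from : List (Int × Int × Int)) (kernel_to : Option (List (Int × Int × Int))) : (List (Int × Int × Int)) × (List (Int × Int × Int)) × List (List Int) × List (List Int) :=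
  let Kf := PySem.List.sorted kernel_from pvLexKey false
  -- 'sorted(kernel_to) if kernel_to else Kf': kernel_to is truthy iff it is a nonempty list
  let Kt := match kernel_to with
    | some l => if l.isEmpty then Kf else PySem.List.sorted l pvLexKey false
    | none => Kf
  let nf : Nat := Kf.length
  let nt : Nat := Kt.length
  -- ow_f = defaultdict(list); for k, tk in enumerate(Kf): ow_f[(tk[1], tk[2])].append(k)
  let owf : PySem.Dict (Int × Int) (List Int) :=
    (PySem.List.enumerate Kf).foldl
      (fun d p => d.modify (p.2.2.1, p.2.2.2) [] (fun l => l ++ [p.1])) PySem.Dict.empty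
  let H0 : List (List Int) := List.replicate nt (List.replicate nt 0)
  let H := (PySem.List.enumerate Kt).foldl (fun M p =>
      (PySem.List.enumerate Kt).foldl (fun M q =>
        if q.2.2.1 == p.2.2.2 then pvSet2 M p.1 q.1 else M) M) H0
  let E0 : List (List Int) := List.replicate nf (List.replicate nt 0)
  let E := (PySem.List.enumerate Kt).foldl (fun M p =>
      (PySem.List.enumerate Kt).foldl (fun M q =>
        if pvGet2 H p.1 q.1 == 0 then M
        else (owf.getD (p.2.1, q.2.1) []).foldl (fun M k => pvSet2 M k q.1) M) M) E0
  (Kf, Kt, H, E)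

-- ===== PORT B =====
def build_H_E_alt (kernel_from : List (Int × Int × Int)) (kernel_to : Option (List (Int × Int × Int))) : (List (Int × Int × Int)) × (List (Int × Int × Int)) × List (List Int) × List (List Int) :=
  let Kf := PySem.List.sorted kernel_from pvLexKey false
  let Kt := match kernel_to with
    | some l => if l.isEmpty then Kf else PySem.List.sorted l pvLexKey false
    | none => Kf
  -- pw = {(ti[0], ti[2]) for ti in Kt}
  let pw : PySem.Set (Int × Int) := PySem.Set.ofList (Kt.map (fun ti => (ti.1, ti.2.2)))
  let H := Kt.map (fun ti => Kt.map (fun tj => if tj.2.1 == ti.2.2 then (1 : Int) else 0))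
  let E := Kf.map (fun tk => Kt.map (fun tj =>
      if PySem.Set.contains pw (tk.2.1, tj.2.1) && tk.2.2 == tj.1 then (1 : Int) else 0))
  (Kf, Kt, H, E)

-- ===== PRECONDITION & SPEC =====
def Spec_build_H_E (kernel_from : List (Int × Int × Int)) (kernel_to : Option (List (Int × Int × Int))) (out : (List (Int × Int × Int)) × (List (Int × Int × Int)) × List (List Int) × List (List Int)) : Prop := out = build_H_E_alt kernel_from kernel_to
instance (kernel_from : List (Int × Int × Int)) (kernel_to : Option (List (Int × Int × Int))) (out : (List (Int × Int × Int)) × (List (Int × Int × Int)) × List (List Int) × List (List Int)) : Decidable (Spec_build_H_E kernel_from kernel_to out) := by unfold Spec_build_H_E; infer_instance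

-- ===== CLAIM (what is proved, stated in full; the proofs are below) =====
def Claim_equal_build_H_E : Prop := ∀ (kernel_from : List (Int × Int × Int)) (kernel_to : Option (List (Int × Int × Int))), Dom_build_H_E kernel_from kernel_to → Spec_build_H_E kernel_from kernel_to (build_H_E kernel_from kernel_to)

-- ===== LEMMAS AND PROOFS =====

-- enumerate as zipIdx (bridges PySem's Int-indexed enumerate to Mathlib's zipIdx)
theorem pv_enum {α : Type} (xs : List α) (n : Nat) :
    PySem.List.enumerate xs (n : Int) = (xs.zipIdx n).map (fun p => ((p.2 : Int), p.1)) := by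
  induction xs generalizing n with
  | nil => simp [PySem.List.enumerate_nil]
  | cons x xs ih =>
    rw [PySem.List.enumerate_cons, List.zipIdx_cons]
    have h1 : ((n : Int) + 1) = ((n + 1 : Nat) : Int) := by push_cast; ring
    rw [h1, ih]
    simp

theorem pv_enum0 {α : Type} (xs : List α) :
    PySem.List.enumerate xs 0 = (xs.zipIdx).map (fun p => ((p.2 : Int), p.1)) := by
  have := pv_enum xs 0
  simpa using this

-- row shape of pvSet2 / pvGet2
theorem pvSet2_length (M : List (List Int)) (i j : Int) :
    (pvSet2 M i j).length = M.length := by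
  simp [pvSet2]

theorem pvSet2_row_length (M : List (List Int)) (i j : Int) (r : Nat) :
    ((pvSet2 M i j).getD r []).length = (M.getD r []).length := by
  simp only [pvSet2, List.getD_eq_getElem?_getD, List.getElem?_set]
  by_cases h : i.toNat = r
  · subst h
    by_cases hr : i.toNat < M.length
    · simp [hr, List.getD_eq_getElem?_getD, List.getElem?_eq_getElem hr]
    · simp [hr, List.getElem?_eq_none (by omega : M.length ≤ i.toNat)]
  · simp [h]

theorem pvGet2_set2 (M : List (List Int)) (i j r c : Nat) :
    pvGet2 (pvSet2 M (i : Int) (j : Int)) (r : Int) (c : Int) =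
      if i = r ∧ j = c ∧ r < M.length ∧ c < (M.getD r []).length then 1
      else pvGet2 M (r : Int) (c : Int) := by
  simp only [pvGet2, pvSet2, Int.toNat_natCast, List.getD_eq_getElem?_getD, List.getElem?_set]
  by_cases hir : i = r
  · subst hir
    by_cases hlt : i < M.length
    · simp only [if_pos rfl, hlt, if_pos trivial]
      simp only [List.getElem?_eq_getElem hlt, Option.getD_some]
      by_cases hjc : j = c
      · subst hjc
        by_cases hc : j < M[i].length
        · have : j < (M.getD i []).length := by
            simpa [List.getD_eq_getElem?_getD, List.getElem?_eq_getElem hlt] using hc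
          simp [hc, hlt, this, List.getD_eq_getElem?_getD, List.getElem?_eq_getElem hlt]
        · have : ¬ j < (M.getD i []).length := by
            simpa [List.getD_eq_getElem?_getD, List.getElem?_eq_getElem hlt] using hc
          simp [hc, this, List.getD_eq_getElem?_getD, List.getElem?_eq_getElem hlt]
      · simp [hjc, List.getD_eq_getElem?_getD, List.getElem?_eq_getElem hlt]
    · have : M[i]? = none := List.getElem?_eq_none (by omega)
      simp [hlt, this]
  · simp [hir]

-- apply a list of (row, col) set-to-1 updates
def pvApply (U : List (Nat × Nat)) (M : List (List Int)) : List (List Int) :=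
  U.foldl (fun M p => pvSet2 M (p.1 : Int) (p.2 : Int)) M

theorem pvApply_length (U : List (Nat × Nat)) (M : List (List Int)) :
    (pvApply U M).length = M.length := by
  induction U generalizing M with
  | nil => rfl
  | cons p U ih => simp [pvApply] at ih ⊢; rw [ih, pvSet2_length]

theorem pvApply_row_length (U : List (Nat × Nat)) (M : List (List Int)) (r : Nat) :
    ((pvApply U M).getD r []).length = (M.getD r []).length := by
  induction U generalizing M with
  | nil => rfl
  | cons p U ih => simp only [pvApply] at ih ⊢; rw [List.foldl_cons, ih, pvSet2_row_length]

theorem pvApply_get (U : List (Nat × Nat)) (M : List (List Int)) (r c : Nat) :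
    pvGet2 (pvApply U M) (r : Int) (c : Int) =
      if (r, c) ∈ U ∧ r < M.length ∧ c < (M.getD r []).length then 1
      else pvGet2 M (r : Int) (c : Int) := by
  induction U generalizing M with
  | nil => simp [pvApply]
  | cons p U ih =>
    simp only [pvApply, List.foldl_cons] at *
    rw [ih, pvSet2_length, pvSet2_row_length, pvGet2_set2]
    obtain ⟨pi, pj⟩ := p
    simp only [List.mem_cons, Prod.mk.injEq, List.getD_eq_getElem?_getD] at *
    by_cases h1 : r = pi
    · by_cases h2 : c = pj
      · subst h1; subst h2; split_ifs <;> tauto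
      · subst h1; split_ifs <;> tauto
    · split_ifs <;> tauto

-- nested foldl = foldl over the list of pairs
theorem pv_foldl_nest {α β γ : Type} (L : List α) (K : α → List β) (g : α → β → γ → γ) (M : γ) :
    L.foldl (fun M x => (K x).foldl (fun M y => g x y M) M) M
      = (L.flatMap fun x => (K x).map (fun y => (x, y))).foldl (fun M p => g p.1 p.2 M) M := by
  induction L generalizing M with
  | nil => rfl
  | cons x L ih => simp [List.foldl_append, List.foldl_map, ih]

-- matrices are equal when shapes and pvGet2-entries agree
theorem pv_matrix_ext (M N : List (List Int)) (hlen : M.length = N.length)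
    (hrow : ∀ r : Nat, (M.getD r []).length = (N.getD r []).length)
    (hval : ∀ r c : Nat, pvGet2 M (r : Int) (c : Int) = pvGet2 N (r : Int) (c : Int)) :
    M = N := by
  apply List.ext_getElem hlen
  intro r h1 h2
  apply List.ext_getElem
  · have := hrow r
    simpa [List.getD_eq_getElem?_getD, List.getElem?_eq_getElem h1,
      List.getElem?_eq_getElem h2] using this
  · intro c hc1 hc2
    have := hval r c
    simpa [pvGet2, List.getD_eq_getElem?_getD, List.getElem?_eq_getElem h1,
      List.getElem?_eq_getElem h2, List.getElem?_eq_getElem hc1,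
      List.getElem?_eq_getElem hc2] using this

-- getD of a map-built matrix
theorem pv_map_getD {α : Type} (l : List α) (f : α → List Int) (r : Nat) :
    ((l.map f).getD r []) = if h : r < l.length then f l[r] else [] := by
  by_cases h : r < l.length
  · simp [List.getD_eq_getElem?_getD, List.getElem?_eq_getElem h,
      List.getElem?_map, h]
  · simp [List.getD_eq_getElem?_getD, List.getElem?_eq_none (by simpa using (by omega : l.length ≤ r)), h]

-- characterization of the (own,written) -> indices dictionary of port A
theorem pv_owf_getD (l : List (Int × Int × Int)) (n : Nat)
    (d : PySem.Dict (Int × Int) (List Int)) (a b : Int) :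
    ((l.zipIdx n).foldl
        (fun d p => d.modify (p.1.2.1, p.1.2.2) [] (fun L => L ++ [((p.2 : Nat) : Int)])) d).getD (a, b) []
      = d.getD (a, b) [] ++
        ((l.zipIdx n).filter (fun p => p.1.2.1 == a && p.1.2.2 == b)).map (fun p => ((p.2 : Nat) : Int)) := by
  induction l generalizing n d with
  | nil => simp
  | cons x l ih =>
    rw [List.zipIdx_cons, List.foldl_cons, ih, PySem.Dict.getD_modify]
    by_cases hk : (a, b) = (x.2.1, x.2.2)
    · have h1 : x.2.1 = a := by rw [Prod.ext_iff] at hk; exact hk.1.symm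
      have h2 : x.2.2 = b := by rw [Prod.ext_iff] at hk; exact hk.2.symm
      simp [hk, h1, h2, List.filter_cons]
    · have : ¬ (x.2.1 = a ∧ x.2.2 = b) := by
        intro h; exact hk (by simp [h.1, h.2])
      simp only [if_neg hk, List.filter_cons]
      simp [this]

-- loop with a conditional set is pvApply over the filtered update pairs
theorem pv_fold_if_set {σ : Type} (P : List σ) (cond : σ → Bool) (f g : σ → Nat)
    (M : List (List Int)) :
    P.foldl (fun M x => if cond x then pvSet2 M ((f x : Nat) : Int) ((g x : Nat) : Int) else M) M
      = pvApply ((P.filter cond).map (fun x => (f x, g x))) M := by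
  rw [pvApply, List.foldl_map, List.foldl_filter]

-- guarded inner set-loop is pvApply over the flattened update pairs
theorem pv_fold_if_nest {σ τ : Type} (P : List σ) (cond : σ → Bool) (W : σ → List τ)
    (f : σ → τ → Nat × Nat) (M : List (List Int)) :
    P.foldl (fun M x => if cond x then
        (W x).foldl (fun M y => pvSet2 M (((f x y).1 : Nat) : Int) (((f x y).2 : Nat) : Int)) M
      else M) M
      = pvApply (P.flatMap (fun x => if cond x then (W x).map (f x) else [])) M := by
  induction P generalizing M with
  | nil => rfl
  | cons x P ih =>
    simp only [List.foldl_cons, List.flatMap_cons, pvApply, List.foldl_append]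
    by_cases h : cond x
    · simp only [h, if_pos, List.foldl_map]
      exact ih _
    · simp only [h, if_neg, Bool.false_eq_true, List.foldl_nil]
      exact ih _

-- zero matrix reads 0 everywhere
theorem pvGet2_zero (m n r c : Nat) :
    pvGet2 (List.replicate m (List.replicate n (0 : Int))) (r : Int) (c : Int) = 0 := by
  simp only [pvGet2, Int.toNat_natCast, List.getD_eq_getElem?_getD, List.getElem?_replicate]
  by_cases hr : r < m
  · by_cases hc : c < n
    · simp [hr, hc]
    · simp [hr, hc]
  · simp [hr]

-- the H matrix of port A, pointwise
theorem pv_H_eq (Kt : List (Int × Int × Int)) :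
    ((PySem.List.enumerate Kt).foldl (fun M p =>
        (PySem.List.enumerate Kt).foldl (fun M q =>
          if q.2.2.1 == p.2.2.2 then pvSet2 M p.1 q.1 else M) M)
      (List.replicate Kt.length (List.replicate Kt.length 0)))
    = Kt.map (fun ti => Kt.map (fun tj => if tj.2.1 == ti.2.2 then (1 : Int) else 0)) := by
  rw [pv_enum0]
  simp only [List.foldl_map]
  rw [pv_foldl_nest Kt.zipIdx (fun _ => Kt.zipIdx)
      (fun p q M => if q.1.2.1 == p.1.2.2 then pvSet2 M ((p.2 : Nat) : Int) ((q.2 : Nat) : Int) else M)]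
  rw [pv_fold_if_set (P := Kt.zipIdx.flatMap fun x => Kt.zipIdx.map fun y => (x, y))
      (cond := fun pq => pq.2.1.2.1 == pq.1.1.2.2) (f := fun pq => pq.1.2) (g := fun pq => pq.2.2)
      (M := List.replicate Kt.length (List.replicate Kt.length 0))]
  apply pv_matrix_ext
  · simp [pvApply_length]
  · intro r
    rw [pvApply_row_length, pv_map_getD]
    by_cases hr : r < Kt.length
    · simp [hr, List.getD_eq_getElem?_getD, List.getElem?_replicate]
    · simp [hr, List.getD_eq_getElem?_getD, List.getElem?_eq_none (by omega : Kt.length ≤ r)]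
  · intro r c
    rw [pvApply_get, pvGet2_zero]
    have hmem : ((r, c) ∈ ((Kt.zipIdx.flatMap fun x => Kt.zipIdx.map fun y => (x, y)).filter
          (fun pq => pq.2.1.2.1 == pq.1.1.2.2)).map fun pq => (pq.1.2, pq.2.2)) ↔
        (∃ ti tj, Kt[r]? = some ti ∧ Kt[c]? = some tj ∧ tj.2.1 = ti.2.2) := by
      simp only [List.mem_map, List.mem_filter, List.mem_flatMap, List.mem_zipIdx_iff_getElem?,
        Prod.mk.injEq, beq_iff_eq]
      constructor
      · rintro ⟨⟨p, q⟩, ⟨⟨⟨tp, ip⟩, hp, ⟨tq, iq⟩, hq, heq⟩, hcond⟩, h1, h2⟩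
        cases heq
        exact ⟨tp, tq, h1 ▸ hp, h2 ▸ hq, hcond⟩
      · rintro ⟨ti, tj, hr', hc', hv⟩
        exact ⟨((ti, r), (tj, c)), ⟨⟨(ti, r), hr', (tj, c), hc', rfl⟩, hv⟩, rfl, rfl⟩
    by_cases hr : r < Kt.length
    · by_cases hc : c < Kt.length
      · have h1 : Kt[r]? = some Kt[r] := List.getElem?_eq_getElem hr
        have h2 : Kt[c]? = some Kt[c] := List.getElem?_eq_getElem hc
        have hbr : r < (List.replicate Kt.length (List.replicate Kt.length (0 : Int))).length := by
          simpa using hr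
        have hbc : c < ((List.replicate Kt.length (List.replicate Kt.length (0 : Int))).getD r []).length := by
          simp [List.getD_eq_getElem?_getD, hr, hc]
        by_cases hv : Kt[c].2.1 = Kt[r].2.2
        · rw [if_pos ⟨hmem.mpr ⟨Kt[r], Kt[c], h1, h2, hv⟩, hbr, hbc⟩]
          simp [pvGet2, List.getD_eq_getElem?_getD, h1, h2, hv]
        · rw [if_neg (by
            rintro ⟨hm, -, -⟩
            obtain ⟨ti, tj, h1', h2', hv'⟩ := hmem.mp hm
            rw [h1] at h1'; rw [h2] at h2'; cases h1'; cases h2'; exact hv hv')]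
          simp [pvGet2, List.getD_eq_getElem?_getD, h1, h2, hv]
      · have h2 : Kt[c]? = none := List.getElem?_eq_none (by omega)
        rw [if_neg (by
          rintro ⟨hm, -, -⟩
          obtain ⟨ti, tj, -, h2', -⟩ := hmem.mp hm
          rw [h2] at h2'; cases h2')]
        simp [pvGet2, List.getD_eq_getElem?_getD, List.getElem?_eq_getElem hr, h2]
    · have h1 : Kt[r]? = none := List.getElem?_eq_none (by omega)
      rw [if_neg (by
        rintro ⟨hm, -, -⟩
        obtain ⟨ti, tj, h1', -, -⟩ := hmem.mp hm
        rw [h1] at h1'; cases h1')]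
      simp [pvGet2, List.getD_eq_getElem?_getD, h1]

theorem pv_getD_empty (k : Int × Int) :
    (PySem.Dict.empty : PySem.Dict (Int × Int) (List Int)).getD k [] = [] := rfl

theorem pv_E_eq (Kf Kt : List (Int × Int × Int)) :
    ((PySem.List.enumerate Kt).foldl (fun M p =>
        (PySem.List.enumerate Kt).foldl (fun M q =>
          if pvGet2 ((PySem.List.enumerate Kt).foldl (fun M p =>
              (PySem.List.enumerate Kt).foldl (fun M q =>
                if q.2.2.1 == p.2.2.2 then pvSet2 M p.1 q.1 else M) M)
            (List.replicate Kt.length (List.replicate Kt.length 0))) p.1 q.1 == 0 then M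
          else (((PySem.List.enumerate Kf).foldl
              (fun d p => d.modify (p.2.2.1, p.2.2.2) [] (fun l => l ++ [p.1]))
              PySem.Dict.empty).getD (p.2.1, q.2.1) []).foldl (fun M k => pvSet2 M k q.1) M) M)
      (List.replicate Kf.length (List.replicate Kt.length 0)))
    = Kf.map (fun tk => Kt.map (fun tj =>
        if PySem.Set.contains (PySem.Set.ofList (Kt.map (fun ti => (ti.1, ti.2.2)))) (tk.2.1, tj.2.1)
            && tk.2.2 == tj.1 then (1 : Int) else 0)) := by
  rw [pv_H_eq Kt, pv_enum0 Kt, pv_enum0 Kf]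
  simp only [List.foldl_map]
  simp only [pv_owf_getD, pv_getD_empty, List.nil_append, List.foldl_map]
  rw [pv_foldl_nest Kt.zipIdx (fun _ => Kt.zipIdx)
      (fun p q M =>
        if pvGet2 (List.map (fun ti => List.map (fun tj => if (tj.2.1 == ti.2.2) = true then 1 else 0) Kt) Kt)
            ((p.2 : Nat) : Int) ((q.2 : Nat) : Int) == 0 then M
        else List.foldl (fun M p' => pvSet2 M ((p'.2 : Nat) : Int) ((q.2 : Nat) : Int))
          M (List.filter (fun w => w.1.2.1 == p.1.1 && w.1.2.2 == q.1.1) Kf.zipIdx))]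
  have hcongr : ∀ (acc : List (List Int)),
      ∀ pq ∈ (Kt.zipIdx.flatMap fun x => Kt.zipIdx.map fun y => (x, y)),
      (fun M (pq : ((Int × Int × Int) × Nat) × ((Int × Int × Int) × Nat)) =>
        if pvGet2 (List.map (fun ti => List.map (fun tj => if (tj.2.1 == ti.2.2) = true then 1 else 0) Kt) Kt)
            ((pq.1.2 : Nat) : Int) ((pq.2.2 : Nat) : Int) == 0 then M
        else List.foldl (fun M p' => pvSet2 M ((p'.2 : Nat) : Int) ((pq.2.2 : Nat) : Int))
          M (List.filter (fun w => w.1.2.1 == pq.1.1.1 && w.1.2.2 == pq.2.1.1) Kf.zipIdx)) acc pq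
      = (fun M (pq : ((Int × Int × Int) × Nat) × ((Int × Int × Int) × Nat)) =>
        if pq.2.1.2.1 == pq.1.1.2.2 then
          List.foldl (fun M p' => pvSet2 M ((p'.2 : Nat) : Int) ((pq.2.2 : Nat) : Int))
            M (List.filter (fun w => w.1.2.1 == pq.1.1.1 && w.1.2.2 == pq.2.1.1) Kf.zipIdx)
        else M) acc pq := by
    intro acc pq hpq
    obtain ⟨p, hp, q, hq, rfl⟩ : ∃ p ∈ Kt.zipIdx, ∃ q ∈ Kt.zipIdx, (p, q) = pq := by
      simp only [List.mem_flatMap, List.mem_map] at hpq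
      obtain ⟨p, hp, q, hq, h⟩ := hpq
      exact ⟨p, hp, q, hq, h⟩
    rw [List.mem_zipIdx_iff_getElem?] at hp hq
    obtain ⟨hplt, hpv⟩ := List.getElem?_eq_some_iff.mp hp
    obtain ⟨hqlt, hqv⟩ := List.getElem?_eq_some_iff.mp hq
    dsimp only
    have hg : pvGet2 (List.map (fun ti => List.map (fun tj => if (tj.2.1 == ti.2.2) = true then 1 else 0) Kt) Kt)
        ((p.2 : Nat) : Int) ((q.2 : Nat) : Int) = if q.1.2.1 == p.1.2.2 then 1 else 0 := by
      simp [pvGet2, List.getD_eq_getElem?_getD, List.getElem?_map,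
        List.getElem?_eq_getElem hplt, List.getElem?_eq_getElem hqlt, hpv, hqv]
    rw [hg]
    by_cases hc : q.1.2.1 == p.1.2.2
    · simp [hc]
    · simp [hc]
  rw [PySem.List.foldl_congr_mem _ _ _ _ hcongr]
  rw [pv_fold_if_nest (P := Kt.zipIdx.flatMap fun x => Kt.zipIdx.map fun y => (x, y))
      (cond := fun pq => pq.2.1.2.1 == pq.1.1.2.2)
      (W := fun pq => List.filter (fun w => w.1.2.1 == pq.1.1.1 && w.1.2.2 == pq.2.1.1) Kf.zipIdx)
      (f := fun pq w => (w.2, pq.2.2))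
      (M := List.replicate Kf.length (List.replicate Kt.length 0))]
  apply pv_matrix_ext
  · simp [pvApply_length]
  · intro r
    rw [pvApply_row_length, pv_map_getD]
    by_cases hr : r < Kf.length
    · simp [hr, List.getD_eq_getElem?_getD]
    · simp [hr, List.getD_eq_getElem?_getD, List.getElem?_eq_none (by omega : Kf.length ≤ r)]
  · intro r c
    rw [pvApply_get, pvGet2_zero]
    have hmem : ((r, c) ∈ (Kt.zipIdx.flatMap fun x => Kt.zipIdx.map fun y => (x, y)).flatMap
          (fun pq => if (pq.2.1.2.1 == pq.1.1.2.2) = true then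
            (List.filter (fun w => w.1.2.1 == pq.1.1.1 && w.1.2.2 == pq.2.1.1) Kf.zipIdx).map
              (fun w => (w.2, pq.2.2)) else [])) ↔
        (∃ tk tj, Kf[r]? = some tk ∧ Kt[c]? = some tj ∧
          ∃ ti ∈ Kt, tj.2.1 = ti.2.2 ∧ tk.2.1 = ti.1 ∧ tk.2.2 = tj.1) := by
      constructor
      · intro hm
        simp only [List.mem_flatMap, List.mem_map] at hm
        obtain ⟨pq, hpq, hw⟩ := hm
        by_cases hcond : (pq.2.1.2.1 == pq.1.1.2.2) = true
        · rw [if_pos hcond] at hw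
          simp only [List.mem_map, List.mem_filter] at hw
          obtain ⟨w, ⟨hwKf, hkey⟩, hwe⟩ := hw
          obtain ⟨p, hp, q, hq, rfl⟩ := hpq
          rw [List.mem_zipIdx_iff_getElem?] at hwKf hp hq
          simp only [Bool.and_eq_true, beq_iff_eq] at hkey hcond
          have h1 := congrArg Prod.fst hwe
          have h2 := congrArg Prod.snd hwe
          dsimp only at h1 h2 hkey hcond
          refine ⟨w.1, q.1, ?_, ?_, p.1, ?_, hcond, hkey.1, hkey.2⟩
          · rw [← h1]; exact hwKf
          · rw [← h2]; exact hq
          · exact List.mem_of_getElem? hp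
        · rw [if_neg hcond] at hw
          cases hw
      · rintro ⟨tk, tj, hKf, hKt, ti, hti, hv, ho, hw⟩
        obtain ⟨i, hilt, hieq⟩ := List.mem_iff_getElem.mp hti
        simp only [List.mem_flatMap, List.mem_map]
        refine ⟨((ti, i), (tj, c)), ⟨(ti, i), ?_, (tj, c), ?_, rfl⟩, ?_⟩
        · rw [List.mem_zipIdx_iff_getElem?]; simp [List.getElem?_eq_getElem hilt, hieq]
        · rw [List.mem_zipIdx_iff_getElem?]; exact hKt
        · rw [if_pos (by simpa using hv)]
          simp only [List.mem_map, List.mem_filter]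
          exact ⟨(tk, r), ⟨by rw [List.mem_zipIdx_iff_getElem?]; exact hKf, by simp [ho, hw]⟩, rfl⟩
    by_cases hr : r < Kf.length
    · by_cases hc : c < Kt.length
      · have h1 : Kf[r]? = some Kf[r] := List.getElem?_eq_getElem hr
        have h2 : Kt[c]? = some Kt[c] := List.getElem?_eq_getElem hc
        have hbr : r < (List.replicate Kf.length (List.replicate Kt.length (0 : Int))).length := by
          simpa using hr
        have hbc : c < ((List.replicate Kf.length (List.replicate Kt.length (0 : Int))).getD r []).length := by
          simp [List.getD_eq_getElem?_getD, hr, hc]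
        by_cases hv : ∃ ti ∈ Kt, Kt[c].2.1 = ti.2.2 ∧ Kf[r].2.1 = ti.1 ∧ Kf[r].2.2 = Kt[c].1
        · rw [if_pos ⟨hmem.mpr ⟨Kf[r], Kt[c], h1, h2, hv⟩, hbr, hbc⟩]
          obtain ⟨ti, hti, e1, e2, e3⟩ := hv
          have hany : (PySem.Set.contains (PySem.Set.ofList (Kt.map (fun ti => (ti.1, ti.2.2))))
              (Kf[r].2.1, Kt[c].2.1) && Kf[r].2.2 == Kt[c].1) = true := by
            simp only [Bool.and_eq_true, beq_iff_eq]
            refine ⟨?_, e3⟩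
            rw [PySem.Set.contains_iff, PySem.Set.mem_ofList]
            exact List.mem_map.mpr ⟨ti, hti, by rw [← e1, ← e2]⟩
          simp only [pvGet2, Int.toNat_natCast, List.getD_eq_getElem?_getD, List.getElem?_map,
            h1, h2, Option.map_some, Option.getD_some]
          rw [hany]
          simp
        · rw [if_neg (by
            rintro ⟨hm, -, -⟩
            obtain ⟨tk, tj, h1', h2', ti, hti, v1, v2, v3⟩ := hmem.mp hm
            rw [h1] at h1'; rw [h2] at h2'; cases h1'; cases h2'
            exact hv ⟨ti, hti, v1, v2, v3⟩)]
          have hany : (PySem.Set.contains (PySem.Set.ofList (Kt.map (fun ti => (ti.1, ti.2.2))))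
              (Kf[r].2.1, Kt[c].2.1) && Kf[r].2.2 == Kt[c].1) = false := by
            rw [Bool.eq_false_iff]
            intro hcontra
            simp only [Bool.and_eq_true, beq_iff_eq, PySem.Set.contains_iff,
              PySem.Set.mem_ofList, List.mem_map] at hcontra
            obtain ⟨⟨ti, hti, he⟩, e3⟩ := hcontra
            obtain ⟨e2, e1⟩ := Prod.ext_iff.mp he
            exact hv ⟨ti, hti, e1.symm, e2.symm, e3⟩
          simp only [pvGet2, Int.toNat_natCast, List.getD_eq_getElem?_getD, List.getElem?_map,
            h1, h2, Option.map_some, Option.getD_some]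
          rw [hany]
          simp
      · have h2 : Kt[c]? = none := List.getElem?_eq_none (by omega)
        rw [if_neg (by
          rintro ⟨hm, -, -⟩
          obtain ⟨tk, tj, -, h2', -⟩ := hmem.mp hm
          rw [h2] at h2'; cases h2')]
        simp [pvGet2, List.getD_eq_getElem?_getD, List.getElem?_eq_getElem hr, h2]
    · have h1 : Kf[r]? = none := List.getElem?_eq_none (by omega)
      rw [if_neg (by
        rintro ⟨hm, -, -⟩
        obtain ⟨tk, tj, h1', -, -⟩ := hmem.mp hm
        rw [h1] at h1'; cases h1')]
      simp [pvGet2, List.getD_eq_getElem?_getD, h1]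

-- ===== VERDICT (by name: the statement is the Claim_ definition above) =====
theorem build_H_E_spec : Claim_equal_build_H_E := by
  intro kernel_from kernel_to _
  show build_H_E kernel_from kernel_to = build_H_E_alt kernel_from kernel_to
  unfold build_H_E build_H_E_alt
  simp only [Prod.mk.injEq]
  refine ⟨trivial, trivial, ?_, ?_⟩
  · exact pv_H_eq _
  · exact pv_E_eq _ _
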